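-- pv_equiv track=rewrite | github.com/AleksandrSpivak/goit-algo-fp | DZ4_1.py | tree_estimate
-- ===== SOURCE A (Python) =====
-- def tree_estimate(hp):
--     """
--     Calculate the number of levels and number of nodes on the lowest level of a tree based on the given hp list.
--
--     Parameters:
--     hp (list): The list representing the hit points of the tree nodes.
--
--     Returns:
--     tuple: A tuple containing the level and low of the tree.
--     """
--     n = len(hp)
--     level = 0
--     while n > 1:
--         n = n // 2
--         level += 1
--
--     low = len(hp)
--     n = level - 1
--     while n >= 0:
--         low = low - 2**n
--         n -= 1
--
--     return level, low
-- ===== SOURCE B (Python) =====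
-- def tree_estimate(hp):
--     n = len(hp)
--     level = max(n.bit_length() - 1, 0)
--     low = n - (2**level - 1)
--     return level, low
-- ===== Notes on version B (the rewrite author's own statement) =====
-- stated objective: simpler
-- what changed: Both while-loops are replaced by closed forms: level = max(n.bit_length()-1, 0) and low = n - (2**level - 1); no loops at all.
import Mathlib
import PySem

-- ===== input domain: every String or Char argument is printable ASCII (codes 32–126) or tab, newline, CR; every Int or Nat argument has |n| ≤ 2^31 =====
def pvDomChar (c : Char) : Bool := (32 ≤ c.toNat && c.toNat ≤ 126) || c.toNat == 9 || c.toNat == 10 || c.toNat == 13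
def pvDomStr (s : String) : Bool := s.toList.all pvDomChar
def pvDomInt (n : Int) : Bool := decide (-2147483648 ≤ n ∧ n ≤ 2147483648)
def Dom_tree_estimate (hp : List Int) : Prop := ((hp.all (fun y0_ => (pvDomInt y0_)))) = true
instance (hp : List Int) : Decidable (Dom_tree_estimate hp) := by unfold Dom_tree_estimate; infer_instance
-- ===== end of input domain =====

-- B replaces A's two while-loops by closed-form arithmetic on the bit length (objective: simpler).

-- ===== PORT A =====
-- first while-loop: halve n, counting levels
def teLevelLoop (n : Int) (level : Int) : Int :=
  if n > 1 then teLevelLoop (PySem.Int.floordiv n 2) (level + 1) else level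
termination_by n.toNat
decreasing_by
  rename_i h
  rw [PySem.Int.floordiv_eq_ediv_of_pos (by omega)]
  omega

-- second while-loop: subtract 2**n for n = level-1 down to 0
def teLowLoop (low : Int) (n : Int) : Int :=
  if n ≥ 0 then teLowLoop (low - 2 ^ n.toNat) (n - 1) else low
termination_by (n + 1).toNat
decreasing_by rename_i h; omega

def tree_estimate (hp : List Int) : Int × Int :=
  let level := teLevelLoop (hp.length : Int) 0
  (level, teLowLoop (hp.length : Int) (level - 1))

-- ===== PORT B =====
def tree_estimate_alt (hp : List Int) : Int × Int :=
  let n : Int := (hp.length : Int)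
  let level : Int := max ((PySem.Int.bitLength n : Int) - 1) 0
  (level, n - (2 ^ level.toNat - 1))

-- ===== PRECONDITION & SPEC =====
def Spec_tree_estimate (hp : List Int) (out : Int × Int) : Prop := out = tree_estimate_alt hp
instance (hp : List Int) (out : Int × Int) : Decidable (Spec_tree_estimate hp out) := by unfold Spec_tree_estimate; infer_instance

-- ===== CLAIM (what is proved, stated in full; the proofs are below) =====
def Claim_equal_tree_estimate : Prop := ∀ (hp : List Int), Dom_tree_estimate hp → Spec_tree_estimate hp (tree_estimate hp)

-- ===== LEMMAS AND PROOFS =====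
theorem bitLength_pos (m : Nat) (hm : 0 < m) : 0 < PySem.Int.bitLength (m : Int) := by
  rw [PySem.Int.bitLength_natCast hm]; omega

theorem teLevelLoop_eq (m : Nat) : ∀ l : Int, 0 < m →
    teLevelLoop (m : Int) l = l + ((PySem.Int.bitLength (m : Int) - 1 : Nat) : Int) := by
  induction m using Nat.strong_induction_on with
  | _ m ih =>
    intro l hm
    rw [teLevelLoop]
    by_cases h2 : (m : Int) > 1
    · have hm2 : 2 ≤ m := by exact_mod_cast h2
      have hfd : PySem.Int.floordiv (m : Int) 2 = ((m / 2 : Nat) : Int) := by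
        exact_mod_cast PySem.Int.floordiv_natCast m 2
      rw [if_pos h2, hfd, ih (m / 2) (by omega) (l + 1) (by omega),
        PySem.Int.bitLength_natCast hm]
      have := bitLength_pos (m / 2) (by omega)
      omega
    · have hm1 : m = 1 := by omega
      subst hm1
      rw [if_neg h2, PySem.Int.bitLength_natCast (by omega : 0 < 1)]
      simp [PySem.Int.bitLength_zero]

theorem teLowLoop_eq (k : Nat) : ∀ low : Int,
    teLowLoop low ((k : Int) - 1) = low - (2 ^ k - 1) := by
  induction k with
  | zero => intro low; rw [teLowLoop]; norm_num
  | succ k ih =>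
    intro low
    rw [teLowLoop, if_pos (by push_cast; omega),
      show ((k + 1 : Nat) : Int) - 1 = (k : Int) from by push_cast; omega,
      Int.toNat_natCast, show ((k : Int)) - 1 = ((k : Nat) : Int) - 1 from rfl, ih,
      pow_succ]
    ring

-- ===== VERDICT (by name: the statement is the Claim_ definition above) =====
theorem tree_estimate_spec : Claim_equal_tree_estimate := by
  intro hp _
  unfold Spec_tree_estimate tree_estimate tree_estimate_alt
  show (teLevelLoop (hp.length : Int) 0,
      teLowLoop (hp.length : Int) (teLevelLoop (hp.length : Int) 0 - 1))
    = (max ((PySem.Int.bitLength (hp.length : Int) : Int) - 1) 0,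
      (hp.length : Int) - (2 ^ (max ((PySem.Int.bitLength (hp.length : Int) : Int) - 1) 0).toNat - 1))
  by_cases h0 : hp.length = 0
  · rw [h0]
    norm_num
    rw [teLevelLoop, teLowLoop]
    norm_num [PySem.Int.bitLength_zero]
  · have hm : 0 < hp.length := Nat.pos_of_ne_zero h0
    have hB := bitLength_pos hp.length hm
    rw [teLevelLoop_eq hp.length 0 hm]
    have hlev : (0 : Int) + ((PySem.Int.bitLength (hp.length : Int) - 1 : Nat) : Int)
        = max ((PySem.Int.bitLength (hp.length : Int) : Int) - 1) 0 := by
      rw [max_eq_left (by omega)]; omega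
    have htn : (max ((PySem.Int.bitLength (hp.length : Int) : Int) - 1) 0).toNat
        = PySem.Int.bitLength (hp.length : Int) - 1 := by
      rw [max_eq_left (by omega)]; omega
    rw [hlev, show max ((PySem.Int.bitLength (hp.length : Int) : Int) - 1) 0 - 1
        = ((PySem.Int.bitLength (hp.length : Int) - 1 : Nat) : Int) - 1 from by
          rw [max_eq_left (by omega)]; omega,
      teLowLoop_eq, htn]
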